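-- pv_equiv track=rewrite | github.com/Kangsan-Jeon/AlgorithmTrain | Programmers/[완]직업군 추천하기.py | solution
-- ===== SOURCE A (Python) =====
-- def solution(table, languages, preference):
--     '''
--     1. make table as dict: {jobs:{language: score, ...}, ...}
--     2. get score according to languages and preference
--     3. compare score each job
--     4. get job of highest score
--     '''
--     table_dict = {
--         col.split()[0]: {
--             language: 5-idx for idx, language in enumerate(col.split()[1:])
--         } for col in table
--     }
--
--     # calculate socre
--     scores = []
--     for job in table_dict.keys():
--         score = 0
--         for idx, language in enumerate(languages):
--             if language in table_dict[job].keys():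
--                 score += table_dict[job][language]*preference[idx]
--         scores.append((score, job))
--     scores = sorted(scores, key=lambda x: (-x[0], x[1]))
--
--     answer= scores[0][1]
--
--     return answer
-- ===== SOURCE B (Python) =====
-- def solution(table, languages, preference):
--     # Same table parsing as the original; scoring is restructured: a language->summed-preference
--     # weight dict is built once, each job's score is a single pass over its column dict, and the
--     # best job is picked by one linear max scan instead of sorting all (score, job) pairs.
--     table_dict = {
--         col.split()[0]: {
--             language: 5 - idx for idx, language in enumerate(col.split()[1:])
--         } for col in table
--     }
--     pref_weight = {}
--     for lang, p in zip(languages, preference):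
--         pref_weight[lang] = pref_weight.get(lang, 0) + p
--     best = None
--     for job, col in table_dict.items():
--         score = sum(v * pref_weight.get(l, 0) for l, v in col.items())
--         if best is None or score > best[0] or (score == best[0] and job < best[1]):
--             best = (score, job)
--     return best[1]
-- ===== Notes on version B (the rewrite author's own statement) =====
-- stated objective: faster
-- what changed: B keeps A's table-dict parsing but inverts the scoring: instead of scanning all languages per job with indexed preference lookups, it builds a language->summed-preference weight dict once and scores each job by a single pass over its column entries, and it replaces sorted(scores, key=(-s, name))[0] with one linear first-minimum scan.
-- outside the precondition, e.g. on solution(['a x', 'a y'], ['x'], []): A returns 'a', B returns 'a'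
import Mathlib
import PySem

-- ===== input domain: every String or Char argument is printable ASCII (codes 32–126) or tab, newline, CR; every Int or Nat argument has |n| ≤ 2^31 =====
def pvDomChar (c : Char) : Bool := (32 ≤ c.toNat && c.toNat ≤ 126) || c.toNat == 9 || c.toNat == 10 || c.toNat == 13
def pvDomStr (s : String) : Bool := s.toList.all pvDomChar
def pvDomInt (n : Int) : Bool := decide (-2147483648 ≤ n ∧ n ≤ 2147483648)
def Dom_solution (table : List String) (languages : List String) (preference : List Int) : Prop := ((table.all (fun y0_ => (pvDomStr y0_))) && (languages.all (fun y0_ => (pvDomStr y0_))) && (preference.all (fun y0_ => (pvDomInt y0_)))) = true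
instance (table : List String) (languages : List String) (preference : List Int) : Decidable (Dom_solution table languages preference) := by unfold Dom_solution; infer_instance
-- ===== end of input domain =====

-- B keeps A's table parsing but replaces the per-job scan over `languages` by a language->summed-preference
-- dict built once, and replaces sorted(...)[0] by one linear first-minimum scan (objective: alternative).

-- ===== PORT A =====
-- {language: 5-idx for idx, language in enumerate(col.split()[1:])}
def pvColDict (ls : List String) : PySem.Dict String Int :=
  (PySem.List.enumerate ls).foldl (fun d p => d.insert p.2 (5 - p.1)) PySem.Dict.empty

-- {col.split()[0]: {...} for col in table}
def pvTableDict (table : List String) : PySem.Dict String (PySem.Dict String Int) :=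
  table.foldl (fun d col =>
    d.insert (PySem.List.pyGetD (PySem.Str.split₀ col) 0 "")
      (pvColDict (PySem.List.slice (PySem.Str.split₀ col) (some 1) none))) PySem.Dict.empty

def solution (table : List String) (languages : List String) (preference : List Int) : String :=
  let td := pvTableDict table
  let scores := td.keys.foldl (fun acc job =>
    acc ++ [((PySem.List.enumerate languages).foldl
      (fun s p => if (td.getD job PySem.Dict.empty).contains p.2
        then s + (td.getD job PySem.Dict.empty).getD p.2 0 * PySem.List.pyGetD preference p.1 0
        else s) 0, job)]) ([] : List (Int × String))
  (PySem.List.pyGetD (PySem.List.sorted2 scores (fun x => -x.1) (fun x => x.2) false) 0 (0, "")).2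

-- ===== PORT B =====
def pvPrefWeight (languages : List String) (preference : List Int) : PySem.Dict String Int :=
  (languages.zip preference).foldl (fun d p => d.insert p.1 (d.getD p.1 0 + p.2)) PySem.Dict.empty

def pvJobScore (col : PySem.Dict String Int) (w : PySem.Dict String Int) : Int :=
  col.items.foldl (fun s q => s + q.2 * w.getD q.1 0) 0

def solution_alt (table : List String) (languages : List String) (preference : List Int) : String :=
  let td := pvTableDict table
  let w := pvPrefWeight languages preference
  let best := td.items.foldl (fun best q =>
    let score := pvJobScore q.2 w
    match best with
    | none => some (score, q.1)
    | some (bs, bj) => if score > bs ∨ (score = bs ∧ q.1 < bj) then some (score, q.1) else some (bs, bj)) none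
  match best with
  | some (_, j) => j
  | none => ""

-- ===== PRECONDITION & SPEC =====
-- Pre_ excludes exactly the raising inputs (empty table -> scores[0] IndexError; a whitespace-only
-- column -> col.split()[0] IndexError; a language with no preference entry occurring in a column's
-- language list -> preference[idx] IndexError), except that the third clause is slightly
-- conservative: it also excludes inputs where such an unpaid-for language occurs only in a column
-- shadowed by a later column with the same job name, on which A still returns (see claim cites).
def Pre_solution (table : List String) (languages : List String) (preference : List Int) : Prop :=
  table ≠ [] ∧ (∀ col ∈ table, PySem.Str.split₀ col ≠ []) ∧
  (∀ i : Nat, i < languages.length → preference.length ≤ i →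
    ∀ col ∈ table, languages.getD i "" ∉ (PySem.Str.split₀ col).tail)
instance (table : List String) (languages : List String) (preference : List Int) : Decidable (Pre_solution table languages preference) := by unfold Pre_solution; infer_instance

def pvWitness_solution : List String × List String × List Int :=
  (["chicken python java", "hotel java"], ["python", "java"], [5, 2])

def Spec_solution (table : List String) (languages : List String) (preference : List Int) (out : String) : Prop := out = solution_alt table languages preference
instance (table : List String) (languages : List String) (preference : List Int) (out : String) : Decidable (Spec_solution table languages preference out) := by unfold Spec_solution; infer_instance

-- ===== CLAIM (what is proved, stated in full; the proofs are below) =====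
def Claim_equal_solution : Prop := ∀ (table : List String) (languages : List String) (preference : List Int), Dom_solution table languages preference → Pre_solution table languages preference → Spec_solution table languages preference (solution table languages preference)

-- ===== LEMMAS AND PROOFS =====

-- the per-pair contribution of one (language, preference) pair to a job dict's score
def pvSZ (jd : PySem.Dict String Int) (Z : List (String × Int)) : Int :=
  (Z.map (fun q => if jd.contains q.1 then jd.getD q.1 0 * q.2 else 0)).sum

theorem pv_before_eq (a b : Int × String) :
    (decide (-a.1 < -b.1) || (!decide (-b.1 < -a.1) && decide (a.2 < b.2)))
      = decide (a.1 > b.1 ∨ (a.1 = b.1 ∧ a.2 < b.2)) := by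
  rcases lt_trichotomy a.1 b.1 with h | h | h
  · simp [neg_lt_neg_iff, h, lt_asymm h, h.ne]
  · simp [neg_lt_neg_iff, h]
  · simp [neg_lt_neg_iff, h, lt_asymm h]

theorem pv_head_insertBy {α : Type} (before : α → α → Bool) (x : α) (acc : List α) :
    (PySem.List.insertBy before x acc).head? =
      some (match acc.head? with | none => x | some h => if before x h then x else h) := by
  cases acc with
  | nil => simp [PySem.List.insertBy]
  | cons y ys => simp only [PySem.List.insertBy, List.head?_cons]; cases h : before x y <;> simp

theorem pv_head_foldl_insertBy {α : Type} (before : α → α → Bool) (xs : List α) (acc : List α) :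
    (xs.foldl (fun a x => PySem.List.insertBy before x a) acc).head? =
      xs.foldl (fun m x => match m with
        | none => some x
        | some h => if before x h then some x else some h) acc.head? := by
  induction xs generalizing acc with
  | nil => rfl
  | cons x xs ih =>
      simp only [List.foldl_cons]
      rw [ih, pv_head_insertBy]
      cases acc with
      | nil => rfl
      | cons y ys => simp only [List.head?_cons]; split <;> rfl



theorem pvColDict_keys (ls : List String) : (pvColDict ls).keys = PySem.Set.ofList ls := by
  unfold pvColDict
  rw [PySem.Dict.keys_foldl_insert_key (PySem.List.enumerate ls) Prod.snd
        (fun d p => 5 - p.1) PySem.Dict.empty]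
  simp [PySem.List.map_snd_enumerate, PySem.Dict.keys_empty, PySem.Set.update_nil_left]

theorem pvColDict_nodup (ls : List String) : (pvColDict ls).keys.Nodup := by
  unfold pvColDict
  exact PySem.Dict.nodup_keys_foldl_insert_key _ _ _ _ (by simp [PySem.Dict.keys_empty])

theorem pvColDict_contains {ls : List String} {l : String} (h : (pvColDict ls).contains l = true) :
    l ∈ ls := by
  rw [PySem.Dict.contains_iff_mem_keys, pvColDict_keys, PySem.Set.mem_ofList] at h
  exact h

theorem pvTableDict_keys (table : List String) :
    (pvTableDict table).keys = PySem.Set.ofList (table.map (fun col => PySem.List.pyGetD (PySem.Str.split₀ col) 0 "")) := by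
  unfold pvTableDict
  rw [PySem.Dict.keys_foldl_insert_key table (fun col => PySem.List.pyGetD (PySem.Str.split₀ col) 0 "")
        (fun d col => pvColDict (PySem.List.slice (PySem.Str.split₀ col) (some 1) none)) PySem.Dict.empty]
  simp [PySem.Dict.keys_empty, PySem.Set.update_nil_left]

theorem pvTableDict_nodup (table : List String) : (pvTableDict table).keys.Nodup := by
  unfold pvTableDict
  exact PySem.Dict.nodup_keys_foldl_insert_key _ _ _ _ (by simp [PySem.Dict.keys_empty])

theorem pvTableDict_prov (table : List String) (job : String) (d0 : PySem.Dict String Int) :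
    (pvTableDict table).getD job d0 = d0 ∨
      ∃ col ∈ table, (pvTableDict table).getD job d0 = pvColDict (PySem.Str.split₀ col).tail := by
  suffices h : ∀ (L : List String) (d : PySem.Dict String (PySem.Dict String Int)),
      (L.foldl (fun d col =>
        d.insert (PySem.List.pyGetD (PySem.Str.split₀ col) 0 "")
          (pvColDict (PySem.List.slice (PySem.Str.split₀ col) (some 1) none))) d).getD job d0 = d.getD job d0 ∨
      ∃ col ∈ L, (L.foldl (fun d col =>
        d.insert (PySem.List.pyGetD (PySem.Str.split₀ col) 0 "")
          (pvColDict (PySem.List.slice (PySem.Str.split₀ col) (some 1) none))) d).getD job d0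
            = pvColDict (PySem.Str.split₀ col).tail by
    unfold pvTableDict
    rcases h table PySem.Dict.empty with h' | h'
    · left; rw [h', PySem.Dict.getD_empty]
    · right; exact h'
  intro L
  induction L with
  | nil => intro d; left; rfl
  | cons c L ih =>
      intro d
      rcases ih (d.insert (PySem.List.pyGetD (PySem.Str.split₀ c) 0 "")
          (pvColDict (PySem.List.slice (PySem.Str.split₀ c) (some 1) none))) with h' | h'
      · rw [List.foldl_cons, h', PySem.Dict.getD_insert]
        split
        · right; exact ⟨c, List.mem_cons_self, by rw [PySem.List.slice_from_one]⟩
        · left; rfl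
      · right
        obtain ⟨col, hm, he⟩ := h'
        exact ⟨col, List.mem_cons_of_mem _ hm, he⟩


theorem pv_scoreA_eq (jd : PySem.Dict String Int) (preference : List Int) :
    ∀ (languages : List String) (k : Nat) (s : Int),
    (∀ j : Nat, j < languages.length → preference.length ≤ k + j →
        jd.contains (languages.getD j "") = false) →
    (PySem.List.enumerate languages (k : Int)).foldl
        (fun s p => if jd.contains p.2 then s + jd.getD p.2 0 * PySem.List.pyGetD preference p.1 0 else s) s
      = s + pvSZ jd (languages.zip (preference.drop k)) := by
  intro languages
  induction languages with
  | nil => intro k s _; simp [PySem.List.enumerate, pvSZ]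
  | cons l ls ih =>
      intro k s hvan
      have hcast : (k : Int) + 1 = ((k + 1 : Nat) : Int) := by push_cast; ring
      have ihk := ih (k + 1) (if jd.contains l = true then s + jd.getD l 0 * PySem.List.pyGetD preference (k : Int) 0 else s)
        (fun j hj hle => by
          have := hvan (j + 1) (by simpa using Nat.succ_lt_succ hj) (by omega)
          simpa using this)
      simp only [PySem.List.enumerate_cons, List.foldl_cons, hcast]
      rw [ihk]
      by_cases hc : jd.contains l = true
      · have hk : k < preference.length := by
          by_contra hk
          have := hvan 0 (by simp) (by omega)
          simp [hc] at this
        rw [List.drop_eq_getElem_cons hk]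
        simp only [List.zip_cons_cons, pvSZ, List.map_cons, List.sum_cons, hc, if_true,
          PySem.List.pyGetD_natCast]
        rw [List.getD_eq_getElem _ _ hk]
        ring
      · rw [if_neg hc]
        by_cases hk : k < preference.length
        · rw [List.drop_eq_getElem_cons hk]
          simp only [List.zip_cons_cons, pvSZ, List.map_cons, List.sum_cons, hc]
          simp
        · rw [List.drop_eq_nil_of_le (by omega), List.drop_eq_nil_of_le (by omega)]
          simp [pvSZ]



theorem pv_sum_insert_list (its : List (String × Int)) (P : PySem.Dict String Int) (l0 : String) (p0 : Int) :
    (its.map (fun q => q.2 * (P.insert l0 (P.getD l0 0 + p0)).getD q.1 0)).sum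
      = (its.map (fun q => q.2 * P.getD q.1 0)).sum
        + ((its.filter (fun q => q.1 = l0)).map (fun q => q.2)).sum * p0 := by
  induction its with
  | nil => simp
  | cons q its ih =>
      simp only [List.map_cons, List.sum_cons, List.filter_cons]
      rw [ih, PySem.Dict.getD_insert]
      by_cases h : q.1 = l0
      · simp only [h, decide_true, if_true, List.map_cons, List.sum_cons]
        ring
      · simp only [h, decide_false, Bool.false_eq_true, if_false]
        ring

theorem pv_uniq_filter {α β : Type} [DecidableEq α] :
    ∀ (its : List (α × β)) (l0 : α) (v : β), (its.map Prod.fst).Nodup → (l0, v) ∈ its →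
      its.filter (fun q => q.1 = l0) = [(l0, v)] := by
  intro its
  induction its with
  | nil => intro _ _ _ h; cases h
  | cons q its ih =>
      intro l0 v hnd hm
      simp only [List.map_cons, List.nodup_cons] at hnd
      rcases List.mem_cons.1 hm with rfl | hm'
      · simp only [List.filter_cons, decide_true, if_true]
        have : its.filter (fun q => q.1 = l0) = [] := by
          apply List.filter_eq_nil_iff.2
          intro a ha
          simp only [decide_eq_true_eq]
          intro he
          have h1 : a.1 ∈ its.map Prod.fst := List.mem_map_of_mem ha
          exact hnd.1 (he ▸ h1)
        simp [this]
      · have hne : q.1 ≠ l0 := by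
          rintro rfl
          have h1 : ((q.1, v) : α × β).1 ∈ its.map Prod.fst := List.mem_map_of_mem hm'
          exact hnd.1 h1
        simp only [List.filter_cons, hne, decide_false, Bool.false_eq_true, if_false]
        exact ih l0 v hnd.2 hm'

theorem pv_filter_items (jd : PySem.Dict String Int) (hnd : jd.keys.Nodup) (l0 : String) :
    ((jd.items.filter (fun q => q.1 = l0)).map (fun q => q.2)).sum
      = if jd.contains l0 then jd.getD l0 0 else 0 := by
  by_cases hc : jd.contains l0 = true
  · have hs : (jd.get? l0).isSome = true := by
      rw [← PySem.Dict.contains_eq_isSome_get?]; exact hc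
    obtain ⟨v, hv⟩ := Option.isSome_iff_exists.1 hs
    have hm : (l0, v) ∈ jd.items := PySem.Dict.mem_items_of_get?_eq_some jd hv
    have hnd' : (jd.items.map Prod.fst).Nodup := hnd
    rw [pv_uniq_filter jd.items l0 v hnd' hm]
    rw [if_pos hc, PySem.Dict.getD_of_mem_items jd hm hnd]
    simp
  · rw [if_neg hc]
    have : jd.items.filter (fun q => q.1 = l0) = [] := by
      apply List.filter_eq_nil_iff.2
      intro a ha
      simp only [decide_eq_true_eq]
      rintro rfl
      exact hc ((PySem.Dict.contains_iff_mem_keys jd a.1).2 (PySem.Dict.mem_keys_of_mem_items jd ha))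
    simp [this]

theorem pv_scoreB_empty (jd : PySem.Dict String Int) : pvJobScore jd PySem.Dict.empty = 0 := by
  unfold pvJobScore
  rw [PySem.List.foldl_add jd.items (fun q => q.2 * PySem.Dict.empty.getD q.1 0) 0]
  simp [PySem.Dict.getD_empty]

theorem pv_scoreB_fold (jd : PySem.Dict String Int) (hnd : jd.keys.Nodup) :
    ∀ (Z : List (String × Int)) (P : PySem.Dict String Int),
    pvJobScore jd (Z.foldl (fun d p => d.insert p.1 (d.getD p.1 0 + p.2)) P)
      = pvJobScore jd P + pvSZ jd Z := by
  intro Z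
  induction Z with
  | nil => intro P; simp [pvSZ]
  | cons z Z ih =>
      intro P
      rw [List.foldl_cons, ih]
      have h1 : pvJobScore jd (P.insert z.1 (P.getD z.1 0 + z.2))
          = pvJobScore jd P + (if jd.contains z.1 then jd.getD z.1 0 else 0) * z.2 := by
        unfold pvJobScore
        rw [PySem.List.foldl_add jd.items (fun q => q.2 * (P.insert z.1 (P.getD z.1 0 + z.2)).getD q.1 0) 0,
            PySem.List.foldl_add jd.items (fun q => q.2 * P.getD q.1 0) 0,
            pv_sum_insert_list, pv_filter_items jd hnd]
        ring
      rw [h1]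
      simp only [pvSZ, List.map_cons, List.sum_cons]
      split_ifs <;> ring


theorem pv_foldl_some {α β : Type} (f : Option β → α → Option β)
    (hf : ∀ (p : β) (x : α), ∃ r, f (some p) x = some r) :
    ∀ (xs : List α) (p : β), ∃ q, xs.foldl f (some p) = some q := by
  intro xs
  induction xs with
  | nil => intro p; exact ⟨p, rfl⟩
  | cons x xs ih =>
      intro p
      obtain ⟨r, hr⟩ := hf p x
      rw [List.foldl_cons, hr]
      exact ih r

-- ===== VERDICT (by name: the statement is the Claim_ definition above) =====
theorem solution_spec : Claim_equal_solution := by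
  unfold Claim_equal_solution
  intro table languages preference _hdom hpre
  obtain ⟨htne, _hsplit, hlang⟩ := hpre
  unfold Spec_solution solution solution_alt
  dsimp only
  set td := pvTableDict table with htd
  set w := pvPrefWeight languages preference with hw
  -- facts about any job's column dict
  have hjd : ∀ job : String, td.getD job PySem.Dict.empty = PySem.Dict.empty ∨
      ∃ col ∈ table, td.getD job PySem.Dict.empty = pvColDict (PySem.Str.split₀ col).tail :=
    fun job => pvTableDict_prov table job _
  have hnd : ∀ job : String, (td.getD job PySem.Dict.empty).keys.Nodup := by
    intro job
    rcases hjd job with h | ⟨col, _, h⟩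
    · rw [h]; simp [PySem.Dict.keys_empty]
    · rw [h]; exact pvColDict_nodup _
  have hvan : ∀ (job : String) (j : ℕ), j < languages.length → preference.length ≤ j →
      (td.getD job PySem.Dict.empty).contains (languages.getD j "") = false := by
    intro job j hj hle
    cases hb : (td.getD job PySem.Dict.empty).contains (languages.getD j "") with
    | false => rfl
    | true =>
        exfalso
        rcases hjd job with h | ⟨col, hcol, h⟩
        · rw [h] at hb; simp [PySem.Dict.contains_empty] at hb
        · rw [h] at hb
          exact hlang j hj hle col hcol (pvColDict_contains hb)
  -- A's inner scoring loop equals B's job score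
  have hscore : ∀ job : String,
      (PySem.List.enumerate languages).foldl
        (fun s p => if (td.getD job PySem.Dict.empty).contains p.2
          then s + (td.getD job PySem.Dict.empty).getD p.2 0 * PySem.List.pyGetD preference p.1 0
          else s) 0 = pvJobScore (td.getD job PySem.Dict.empty) w := by
    intro job
    have hA := pv_scoreA_eq (td.getD job PySem.Dict.empty) preference languages 0 0
      (fun j hj hle => hvan job j hj (by omega))
    rw [hw]
    unfold pvPrefWeight
    rw [pv_scoreB_fold (td.getD job PySem.Dict.empty) (hnd job) (languages.zip preference)
          PySem.Dict.empty,
        pv_scoreB_empty]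
    simpa using hA
  -- A's scores list is a map over the keys
  rw [PySem.List.foldl_append_singleton_eq_map
        (fun job => ((PySem.List.enumerate languages).foldl
          (fun s p => if (td.getD job PySem.Dict.empty).contains p.2
            then s + (td.getD job PySem.Dict.empty).getD p.2 0 * PySem.List.pyGetD preference p.1 0
            else s) 0, job)) td.keys [],
      List.nil_append]
  have hfun : (fun job => ((PySem.List.enumerate languages).foldl
        (fun s p => if (td.getD job PySem.Dict.empty).contains p.2
          then s + (td.getD job PySem.Dict.empty).getD p.2 0 * PySem.List.pyGetD preference p.1 0
          else s) 0, job))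
      = (fun job => (pvJobScore (td.getD job PySem.Dict.empty) w, job)) :=
    funext fun job => by rw [hscore job]
  rw [hfun]
  -- B's items fold is a fold over the keys
  rw [PySem.Dict.items_eq_map_keys td (htd ▸ pvTableDict_nodup table) PySem.Dict.empty,
      List.foldl_map]
  dsimp only
  -- A's sorted2 is an insertBy fold; its head is the running first-minimum
  have hsorted2 : PySem.List.sorted2 (td.keys.map (fun job => (pvJobScore (td.getD job PySem.Dict.empty) w, job)))
        (fun x => -x.1) (fun x => x.2) false
      = (td.keys.map (fun job => (pvJobScore (td.getD job PySem.Dict.empty) w, job))).foldl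
          (fun a x => PySem.List.insertBy
            (fun a b => decide (-a.1 < -b.1) || (!decide (-b.1 < -a.1) && decide (a.2 < b.2))) x a) [] := rfl
  rw [hsorted2]
  have hkeysne : td.keys ≠ [] := by
    rw [htd, pvTableDict_keys]
    cases table with
    | nil => cases htne rfl
    | cons c r =>
        exact List.ne_nil_of_mem
          ((PySem.Set.mem_ofList _ _).2 (List.mem_map_of_mem List.mem_cons_self))
  have hmin : (List.foldl
        (fun a x => PySem.List.insertBy (fun a b => decide (-a.1 < -b.1) || !decide (-b.1 < -a.1) && decide (a.2 < b.2)) x a)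
        [] (List.map (fun job => (pvJobScore (td.getD job PySem.Dict.empty) w, job)) td.keys)).head?
      = List.foldl
        (fun x y => match x with
          | none => some (pvJobScore (td.getD y PySem.Dict.empty) w, y)
          | some (bs, bj) =>
            if pvJobScore (td.getD y PySem.Dict.empty) w > bs ∨
                (pvJobScore (td.getD y PySem.Dict.empty) w = bs ∧ y < bj) then
              some (pvJobScore (td.getD y PySem.Dict.empty) w, y)
            else some (bs, bj))
        none td.keys := by
    rw [pv_head_foldl_insertBy, List.head?_nil, List.foldl_map]
    apply PySem.List.foldl_congr_mem
    intro m job _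
    cases m with
    | none => rfl
    | some p =>
        obtain ⟨bs, bj⟩ := p
        have hb := pv_before_eq (pvJobScore (td.getD job PySem.Dict.empty) w, job) (bs, bj)
        dsimp only at hb ⊢
        simp only [hb, decide_eq_true_eq]
  obtain ⟨q, hq⟩ : ∃ q, List.foldl
        (fun x y => match x with
          | none => some (pvJobScore (td.getD y PySem.Dict.empty) w, y)
          | some (bs, bj) =>
            if pvJobScore (td.getD y PySem.Dict.empty) w > bs ∨
                (pvJobScore (td.getD y PySem.Dict.empty) w = bs ∧ y < bj) then
              some (pvJobScore (td.getD y PySem.Dict.empty) w, y)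
            else some (bs, bj))
        none td.keys = some q := by
    obtain ⟨k, ks, hk⟩ := List.ne_nil_iff_exists_cons.mp hkeysne
    rw [hk, List.foldl_cons]
    exact pv_foldl_some _ (fun p x => by
      obtain ⟨bs, bj⟩ := p
      dsimp only
      by_cases hcond : pvJobScore (td.getD x PySem.Dict.empty) w > bs ∨
          (pvJobScore (td.getD x PySem.Dict.empty) w = bs ∧ x < bj)
      · exact ⟨_, if_pos hcond⟩
      · exact ⟨_, if_neg hcond⟩) ks (pvJobScore (td.getD k PySem.Dict.empty) w, k)
  rw [hq] at hmin
  obtain ⟨t, ht⟩ := List.head?_eq_some_iff.mp hmin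
  rw [ht, PySem.List.pyGetD_zero_cons]
  exact (congrArg (fun o : Option (Int × String) => match o with
    | some (_, j) => j
    | none => "") hq).symm
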